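-- pv_equiv track=rewrite | github.com/shufangxun/CS61A | Exam_pre/Exam01/exam01.py | longest_increasing_suffix
-- ===== SOURCE A (Python) =====
-- def  longest_increasing_suffix(n):
--     """
--     Implement the longest_increasing_suffix function, which returns the longest
--     suffix (end) of a positive integer that consists of strictly increasing digits.
--     >>> longest_increasing_suffix(63134)
--     134
--     >>> longest_increasing_suffix(233)
--     3
--     >>> longest_increasing_suffix(5689)
--     5689
--     >>> longest_increasing_suffix(568901)
--     # Note: 01 is the suffix, displayed as 1
--     1
--     """
--     m, suffix, k = 10, 0, 1
--     while n:
--         n, last = n // 10, n % 10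
--         if  last < m:
--             m, suffix, k = last, suffix + k * last, 10 * k
--         else:
--             return suffix
--     return suffix
-- ===== SOURCE B (Python) =====
-- def longest_increasing_suffix(n):
--     # Find the length of the strictly-increasing digit suffix first,
--     # then extract it with a single modulo by a power of 10.
--     def suffix_len(m):
--         rest = m // 10
--         if rest and rest % 10 < m % 10:
--             return 1 + suffix_len(rest)
--         return 1
--     return n % 10 ** suffix_len(n)
-- ===== Notes on version B (the rewrite author's own statement) =====
-- stated objective: simpler
-- what changed: B first computes the length of the strictly-increasing digit suffix by a bare recursion and then extracts the answer with a single modulo by a power of 10, instead of A's loop that accumulates the suffix value and a place-value multiplier while dividing digits off.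
import Mathlib
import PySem

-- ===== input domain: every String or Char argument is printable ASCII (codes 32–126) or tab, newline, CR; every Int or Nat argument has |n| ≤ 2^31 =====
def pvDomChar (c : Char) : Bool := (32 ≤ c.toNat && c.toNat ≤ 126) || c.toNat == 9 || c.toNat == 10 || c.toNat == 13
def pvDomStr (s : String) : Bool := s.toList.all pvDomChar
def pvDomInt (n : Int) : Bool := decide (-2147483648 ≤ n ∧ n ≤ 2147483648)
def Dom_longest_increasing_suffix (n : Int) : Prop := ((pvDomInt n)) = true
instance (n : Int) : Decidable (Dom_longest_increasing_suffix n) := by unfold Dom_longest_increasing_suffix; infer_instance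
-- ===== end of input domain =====

-- B finds the split boundary (suffix length) first and takes one modulo, instead of A's
-- value-accumulating digit loop; objective: simpler.

-- ===== PORT A =====
-- the while loop of A; fuel only makes the recursion total: n.natAbs + 11 iterations always
-- suffice, since each iteration either shrinks |n| or strictly decreases m through 0..10
def lisLoop : Nat → Int → Int → Int → Int → Int
  | 0, _, suffix, _, _ => suffix
  | fuel+1, n, suffix, m, k =>
    if n = 0 then suffix
    else
      let last := PySem.Int.mod n 10
      if last < m then lisLoop fuel (PySem.Int.floordiv n 10) (suffix + k * last) last (10 * k)
      else suffix

def longest_increasing_suffix (n : Int) : Int := lisLoop (n.natAbs + 11) n 0 10 1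

-- ===== PORT B =====
-- Source B's suffix_len; fuel only makes the recursion total (same bound as for lisLoop)
def slen : Nat → Int → Int
  | 0, _ => 1
  | fuel+1, m =>
    let rest := PySem.Int.floordiv m 10
    if rest ≠ 0 ∧ PySem.Int.mod rest 10 < PySem.Int.mod m 10 then 1 + slen fuel rest
    else 1

-- 10 ** suffix_len(n): the exponent is always ≥ 1, so .toNat is exact
def longest_increasing_suffix_alt (n : Int) : Int :=
  PySem.Int.mod n (10 ^ (slen (n.natAbs + 11) n).toNat)

-- ===== PRECONDITION & SPEC =====
def Spec_longest_increasing_suffix (n : Int) (out : Int) : Prop := out = longest_increasing_suffix_alt n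
instance (n : Int) (out : Int) : Decidable (Spec_longest_increasing_suffix n out) := by unfold Spec_longest_increasing_suffix; infer_instance

-- ===== CLAIM (what is proved, stated in full; the proofs are below) =====
def Claim_equal_longest_increasing_suffix : Prop := ∀ (n : Int), Dom_longest_increasing_suffix n → Spec_longest_increasing_suffix n (longest_increasing_suffix n)

-- ===== LEMMAS AND PROOFS =====

-- the value of the strictly-increasing suffix of n whose leading (leftmost) digit must be < m
def lisV : Nat → Int → Int → Int
  | 0, _, _ => 0
  | f+1, n, m =>
    if n = 0 then 0
    else if PySem.Int.mod n 10 < m then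
      PySem.Int.mod n 10 + 10 * lisV f (PySem.Int.floordiv n 10) (PySem.Int.mod n 10)
    else 0

lemma lisV_succ (f : Nat) (n m : Int) :
    lisV (f+1) n m =
      if n = 0 then 0
      else if PySem.Int.mod n 10 < m then
        PySem.Int.mod n 10 + 10 * lisV f (PySem.Int.floordiv n 10) (PySem.Int.mod n 10)
      else 0 := rfl

lemma slen_succ (f : Nat) (n : Int) :
    slen (f+1) n =
      if PySem.Int.floordiv n 10 ≠ 0 ∧
          PySem.Int.mod (PySem.Int.floordiv n 10) 10 < PySem.Int.mod n 10 then
        1 + slen f (PySem.Int.floordiv n 10)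
      else 1 := rfl

lemma lisLoop_eq (f : Nat) : ∀ (n suffix m k : Int),
    lisLoop f n suffix m k = suffix + k * lisV f n m := by
  induction f with
  | zero => intro n suffix m k; simp [lisLoop, lisV]
  | succ f ih =>
    intro n suffix m k
    simp only [lisLoop, lisV]
    split_ifs with h1 h2
    · simp
    · rw [ih]; ring
    · simp

lemma lisV_congr (f : Nat) (n m m' : Int)
    (h : (PySem.Int.mod n 10 < m) ↔ (PySem.Int.mod n 10 < m')) :
    lisV f n m = lisV f n m' := by
  cases f with
  | zero => rfl
  | succ f =>
    rw [lisV_succ, lisV_succ]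
    by_cases h1 : n = 0
    · simp [h1]
    · rw [if_neg h1, if_neg h1]
      by_cases h2 : PySem.Int.mod n 10 < m
      · rw [if_pos h2, if_pos (h.mp h2)]
      · rw [if_neg h2, if_neg (fun hh => h2 (h.mpr hh))]

lemma slen_pos (f : Nat) : ∀ n : Int, 1 ≤ slen f n := by
  induction f with
  | zero => intro n; simp [slen]
  | succ f ih =>
    intro n
    rw [slen_succ]
    split_ifs with h
    · have := ih (PySem.Int.floordiv n 10); omega
    · omega

lemma mod_pow_split (n : Int) (L : Nat) :
    PySem.Int.mod n (10 * 10 ^ L) = PySem.Int.mod n 10 + 10 * PySem.Int.mod (PySem.Int.floordiv n 10) (10 ^ L) := by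
  have hP : (0:Int) < 10 ^ L := pow_pos (by norm_num) L
  rw [PySem.Int.mod_eq_emod_of_pos (show (0:Int) < 10 * 10 ^ L by positivity),
      PySem.Int.mod_eq_emod_of_pos (show (0:Int) < 10 by norm_num),
      PySem.Int.mod_eq_emod_of_pos hP,
      PySem.Int.floordiv_eq_ediv_of_pos (show (0:Int) < 10 by norm_num)]
  set r := n / 10 with hr
  set d := n % 10 with hd
  have hn : n = 10 * (10 ^ L) * (r / 10 ^ L) + (10 * (r % 10 ^ L) + d) := by
    have h1 : 10 * r + d = n := by rw [hr, hd]; omega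
    have h2 : 10 ^ L * (r / 10 ^ L) + r % 10 ^ L = r := Int.mul_ediv_add_emod r (10 ^ L)
    nlinarith [h1, h2]
  have hd0 : 0 ≤ d := Int.emod_nonneg n (by norm_num)
  have hd1 : d < 10 := Int.emod_lt_of_pos n (by norm_num)
  have hr0 : 0 ≤ r % 10 ^ L := Int.emod_nonneg r (by omega)
  have hr1 : r % 10 ^ L < 10 ^ L := Int.emod_lt_of_pos r hP
  calc n % (10 * 10 ^ L)
      = (10 * (r % 10 ^ L) + d + 10 * 10 ^ L * (r / 10 ^ L)) % (10 * 10 ^ L) := by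
        conv_lhs => rw [hn]
        ring_nf
    _ = (10 * (r % 10 ^ L) + d) % (10 * 10 ^ L) := by
        rw [Int.add_mul_emod_self_left]
    _ = 10 * (r % 10 ^ L) + d := Int.emod_eq_of_lt (by omega) (by omega)
    _ = d + 10 * (r % 10 ^ L) := by ring

lemma slen_mod_eq_lisV (f : Nat) : ∀ n : Int,
    PySem.Int.mod n (10 ^ (slen f n).toNat) = lisV (f + 1) n 10 := by
  induction f with
  | zero =>
    intro n
    rw [lisV_succ]
    by_cases h1 : n = 0
    · subst h1; decide
    · rw [if_neg h1, if_pos (PySem.Int.mod_lt n (by norm_num))]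
      simp [slen, lisV]
  | succ f ih =>
    intro n
    rw [slen_succ, lisV_succ (f+1)]
    by_cases hc : PySem.Int.floordiv n 10 ≠ 0 ∧
        PySem.Int.mod (PySem.Int.floordiv n 10) 10 < PySem.Int.mod n 10
    · rw [if_pos hc]
      have hL : 1 ≤ slen f (PySem.Int.floordiv n 10) := slen_pos f _
      have htn : (1 + slen f (PySem.Int.floordiv n 10)).toNat
          = 1 + (slen f (PySem.Int.floordiv n 10)).toNat := by omega
      rw [htn, pow_add, pow_one, mod_pow_split]
      have hn0 : n ≠ 0 := by
        intro h; apply hc.1; subst h; rfl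
      have hrec : lisV (f + 1) (PySem.Int.floordiv n 10) (PySem.Int.mod n 10)
          = lisV (f + 1) (PySem.Int.floordiv n 10) 10 := by
        apply lisV_congr
        exact ⟨fun _ => PySem.Int.mod_lt _ (by norm_num), fun _ => hc.2⟩
      rw [if_neg hn0, if_pos (PySem.Int.mod_lt n (by norm_num)), hrec, ih]
    · rw [if_neg hc]
      have hc' : PySem.Int.floordiv n 10 ≠ 0 →
          PySem.Int.mod n 10 ≤ PySem.Int.mod (PySem.Int.floordiv n 10) 10 := by
        intro hr
        by_contra hle
        exact hc ⟨hr, not_le.mp hle⟩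
      by_cases h1 : n = 0
      · subst h1; rw [if_pos rfl]; decide
      · rw [if_neg h1, if_pos (PySem.Int.mod_lt n (by norm_num))]
        have hz : lisV (f + 1) (PySem.Int.floordiv n 10) (PySem.Int.mod n 10) = 0 := by
          rw [lisV_succ]
          by_cases hrest : PySem.Int.floordiv n 10 = 0
          · rw [if_pos hrest]
          · rw [if_neg hrest, if_neg (not_lt.mpr (hc' hrest))]
        rw [hz]
        norm_num [slen]

-- lisV stabilises once the fuel exceeds m: each recursive step replaces m by
-- mod n 10, which is nonnegative and strictly smaller, so the depth is at most m.toNat + 1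
lemma lisV_stab : ∀ (f : Nat) (n m : Int), m.toNat < f → lisV f n m = lisV (f + 1) n m := by
  intro f
  induction f with
  | zero => intro n m h; exact absurd h (Nat.not_lt_zero _)
  | succ f ih =>
    intro n m h
    rw [lisV_succ f, lisV_succ (f+1)]
    by_cases h2 : n = 0
    · simp [h2]
    · rw [if_neg h2, if_neg h2]
      by_cases h3 : PySem.Int.mod n 10 < m
      · rw [if_pos h3, if_pos h3]
        have hm0 : 0 ≤ PySem.Int.mod n 10 := PySem.Int.mod_nonneg n (by norm_num)
        have hlt : (PySem.Int.mod n 10).toNat < f := by omega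
        rw [ih (PySem.Int.floordiv n 10) (PySem.Int.mod n 10) hlt]
      · rw [if_neg h3, if_neg h3]

-- ===== VERDICT (by name: the statement is the Claim_ definition above) =====
theorem longest_increasing_suffix_spec : Claim_equal_longest_increasing_suffix := by
  intro n _
  unfold Spec_longest_increasing_suffix longest_increasing_suffix longest_increasing_suffix_alt
  rw [lisLoop_eq, slen_mod_eq_lisV,
      ← lisV_stab (n.natAbs + 11) n 10 (by omega)]
  ring
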